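-- pv_equiv track=rewrite | github.com/infoinvoria-cell/invoria-dashboard | backend/services/globe_data.py | _cluster_sorted_meta
-- ===== SOURCE A (Python) =====
-- from typing import Any, Awaitable, Callable
--
-- _HEATMAP_CLUSTER_ORDER = [
--     "FX",
--     "Metals",
--     "Equities",
--     "Crypto",
--     "Energy",
--     "Agriculture",
--     "Softs",
--     "Livestock",
-- ]
--
-- def _as_meta(asset: dict[str, Any]) -> dict[str, Any]:
--     return {
--         "assetId": str(asset.get("id", "")).strip().lower(),
--         "symbol": str(asset.get("symbol") or asset.get("tvSource") or "").strip(),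
--         "name": str(asset.get("name") or "").strip(),
--         "category": str(asset.get("category") or "Other").strip(),
--     }
--
-- def _cluster_sorted_meta(assets: list[dict[str, Any]]) -> list[dict[str, Any]]:
--     rank = {cat: idx for idx, cat in enumerate(_HEATMAP_CLUSTER_ORDER)}
--     meta = [_as_meta(a) for a in assets]
--     meta.sort(
--         key=lambda m: (
--             int(rank.get(str(m.get("category") or ""), len(_HEATMAP_CLUSTER_ORDER))),
--             str(m.get("name") or "").lower(),
--             str(m.get("symbol") or "").lower(),
--             str(m.get("assetId") or ""),
--         )
--     )
--     return meta
-- ===== SOURCE B (Python) =====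
-- _HEATMAP_CLUSTER_ORDER = [
--     "FX",
--     "Metals",
--     "Equities",
--     "Crypto",
--     "Energy",
--     "Agriculture",
--     "Softs",
--     "Livestock",
-- ]
--
--
-- def _cluster_sorted_meta(assets):
--     # Bucket by category rank, then sort each bucket by the secondary key only.
--     rank = {cat: idx for idx, cat in enumerate(_HEATMAP_CLUSTER_ORDER)}
--     n = len(_HEATMAP_CLUSTER_ORDER)
--     ranked = []
--     for asset in assets:
--         aid = str(asset.get("id", "")).strip().lower()
--         symbol = str(asset.get("symbol") or asset.get("tvSource") or "").strip()
--         name = str(asset.get("name") or "").strip()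
--         category = str(asset.get("category") or "Other").strip()
--         m = {"assetId": aid, "symbol": symbol, "name": name, "category": category}
--         ranked.append((rank.get(category, n), m))
--     out = []
--     for r in range(n + 1):
--         group = [m for (g, m) in ranked if g == r]
--         group.sort(key=lambda m: (m.get("name", "").lower(), m.get("symbol", "").lower(), m.get("assetId", "")))
--         out.extend(group)
--     return out
-- ===== Notes on version B (the rewrite author's own statement) =====
-- stated objective: alternative
-- what changed: Instead of one composite-key sort of the whole list by (rank, name, symbol, id), B tags each meta with its category rank in a single pass, then for each rank 0..8 collects that bucket and sorts it by the secondary (name, symbol, id) key only, concatenating the buckets in rank order.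
import Mathlib
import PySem

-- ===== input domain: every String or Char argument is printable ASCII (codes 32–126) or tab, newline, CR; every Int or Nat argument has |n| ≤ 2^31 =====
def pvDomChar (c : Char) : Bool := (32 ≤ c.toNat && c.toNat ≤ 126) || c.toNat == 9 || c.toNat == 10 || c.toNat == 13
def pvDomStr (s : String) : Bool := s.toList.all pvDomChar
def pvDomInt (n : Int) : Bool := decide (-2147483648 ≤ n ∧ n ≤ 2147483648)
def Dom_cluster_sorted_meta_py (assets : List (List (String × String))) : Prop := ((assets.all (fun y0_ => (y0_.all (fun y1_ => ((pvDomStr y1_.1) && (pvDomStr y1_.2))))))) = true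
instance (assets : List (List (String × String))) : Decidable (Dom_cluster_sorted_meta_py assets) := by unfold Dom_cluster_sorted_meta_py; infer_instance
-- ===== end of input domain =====

-- B buckets assets by category rank and sorts each bucket by the secondary key only
-- (alternative decomposition, same cost class; equal return value proved below).

-- ===== PORT A =====
def pvOrderA : List String :=
  ["FX", "Metals", "Equities", "Crypto", "Energy", "Agriculture", "Softs", "Livestock"]

-- Python's 'x or y' on an optional string: None and "" are falsy
def pvOrA (o : Option String) (dflt : String) : String :=
  match o with
  | some s => if s = "" then dflt else s
  | none => dflt

-- rank = {cat: idx for idx, cat in enumerate(_HEATMAP_CLUSTER_ORDER)}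
def pvRankA : PySem.Dict String Int :=
  (PySem.List.enumerate pvOrderA).foldl (fun d p => d.insert p.2 p.1) PySem.Dict.empty

-- _as_meta (str() on a str value is the identity on this task's str→str dicts)
def pvAsMeta (asset : List (String × String)) : List (String × String) :=
  let d := PySem.Dict.mk asset
  [("assetId", PySem.Str.lower (PySem.Str.strip (d.getD "id" ""))),
   ("symbol", PySem.Str.strip (pvOrA (d.get? "symbol") (pvOrA (d.get? "tvSource") ""))),
   ("name", PySem.Str.strip (pvOrA (d.get? "name") "")),
   ("category", PySem.Str.strip (pvOrA (d.get? "category") "Other"))]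

-- the sort key lambda; the 4-tuple key is ported as sorted2's (first, rest) split; the
-- remaining 3 strings as an equal-length List String, whose '<' is Python's tuple comparison
def pvKey1 (m : List (String × String)) : Int :=
  let d := PySem.Dict.mk m
  pvRankA.getD (pvOrA (d.get? "category") "") (pvOrderA.length : Int)

def pvKey2 (m : List (String × String)) : List String :=
  let d := PySem.Dict.mk m
  [PySem.Str.lower (pvOrA (d.get? "name") ""),
   PySem.Str.lower (pvOrA (d.get? "symbol") ""), pvOrA (d.get? "assetId") ""]

def cluster_sorted_meta_py (assets : List (List (String × String))) : List (List (String × String)) :=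
  PySem.List.sorted2 (assets.map pvAsMeta) pvKey1 pvKey2 false

-- ===== PORT B =====
def pvOrderB : List String :=
  ["FX", "Metals", "Equities", "Crypto", "Energy", "Agriculture", "Softs", "Livestock"]

def pvOrB (o : Option String) (dflt : String) : String :=
  match o with
  | some s => if s = "" then dflt else s
  | none => dflt

def pvRankB : PySem.Dict String Int :=
  (PySem.List.enumerate pvOrderB).foldl (fun d p => d.insert p.2 p.1) PySem.Dict.empty

-- the body of B's first loop: ranked.append((rank.get(category, n), m))
def pvRankedOf (asset : List (String × String)) : Int × List (String × String) :=
  let d := PySem.Dict.mk asset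
  let aid := PySem.Str.lower (PySem.Str.strip (d.getD "id" ""))
  let symbol := PySem.Str.strip (pvOrB (d.get? "symbol") (pvOrB (d.get? "tvSource") ""))
  let name := PySem.Str.strip (pvOrB (d.get? "name") "")
  let category := PySem.Str.strip (pvOrB (d.get? "category") "Other")
  let m := [("assetId", aid), ("symbol", symbol), ("name", name), ("category", category)]
  (pvRankB.getD category (pvOrderB.length : Int), m)

-- B's per-bucket sort key (m.get(...) with a default), the same List-String tuple encoding
def pvKeyB (m : List (String × String)) : List String :=
  let d := PySem.Dict.mk m
  [PySem.Str.lower (d.getD "name" ""),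
   PySem.Str.lower (d.getD "symbol" ""), d.getD "assetId" ""]

def cluster_sorted_meta_py_alt (assets : List (List (String × String))) : List (List (String × String)) :=
  let n : Int := (pvOrderB.length : Int)
  let ranked : List (Int × List (String × String)) :=
    assets.foldl (fun acc asset => acc ++ [pvRankedOf asset]) []
  (PySem.List.pyRange 0 (n + 1) 1).foldl
    (fun out r =>
      out ++ PySem.List.sorted ((ranked.filter (fun p => p.1 == r)).map (·.2)) pvKeyB false)
    []

-- ===== PRECONDITION & SPEC =====
def Spec_cluster_sorted_meta_py (assets : List (List (String × String))) (out : List (List (String × String))) : Prop := out = cluster_sorted_meta_py_alt assets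
instance (assets : List (List (String × String))) (out : List (List (String × String))) : Decidable (Spec_cluster_sorted_meta_py assets out) := by unfold Spec_cluster_sorted_meta_py; infer_instance

-- ===== CLAIM (what is proved, stated in full; the proofs are below) =====
def Claim_equal_cluster_sorted_meta_py : Prop := ∀ (assets : List (List (String × String))), Dom_cluster_sorted_meta_py assets → Spec_cluster_sorted_meta_py assets (cluster_sorted_meta_py assets)

-- ===== LEMMAS AND PROOFS =====

-- inserting into a concatenation: either in the left part (some element must come after x) or in the right
theorem pv_insertBy_append {α : Type} (before : α → α → Bool) (x : α) (ys zs : List α) :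
    PySem.List.insertBy before x (ys ++ zs) =
      if ys.any (before x) then PySem.List.insertBy before x ys ++ zs
      else ys ++ PySem.List.insertBy before x zs := by
  induction ys with
  | nil => simp
  | cons y ys ih =>
    by_cases h : before x y
    · simp [PySem.List.insertBy, h]
    · simp only [List.cons_append, PySem.List.insertBy, h, Bool.false_eq_true, if_false, ih,
        List.any_cons, Bool.false_or]
      by_cases h2 : ys.any (before x) <;> simp [h2]

-- if x must come before everything, insertBy prepends
theorem pv_insertBy_all_before {α : Type} (before : α → α → Bool) (x : α) (zs : List α)
    (h : ∀ y ∈ zs, before x y = true) :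
    PySem.List.insertBy before x zs = x :: zs := by
  cases zs with
  | nil => rfl
  | cons y ys => simp [PySem.List.insertBy, h y (by simp)]

-- insertBy only looks at 'before x ·' on members of the list
theorem pv_insertBy_congr {α : Type} (before before' : α → α → Bool) (x : α) (ys : List α)
    (h : ∀ y ∈ ys, before x y = before' x y) :
    PySem.List.insertBy before x ys = PySem.List.insertBy before' x ys := by
  induction ys with
  | nil => rfl
  | cons y ys ih =>
    have hy := h y (by simp)
    simp only [PySem.List.insertBy, hy]
    by_cases h2 : before' x y <;>
      simp [h2, ih (fun z hz => h z (by simp [hz]))]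

theorem pv_flatMap_congr {α β : Type} (R : List α) (F H : α → List β)
    (h : ∀ j ∈ R, F j = H j) : R.flatMap F = R.flatMap H := by
  induction R with
  | nil => rfl
  | cons j R ih =>
    simp only [List.flatMap_cons, h j (by simp), ih (fun z hz => h z (by simp [hz]))]

-- the comparison sorted2 uses: primary Int rank, then the secondary key
def pvLt {α κ : Type} [LT κ] [DecidableLT κ] (r : α → Int) (k : α → κ) (a b : α) : Bool :=
  decide (r a < r b) || (!decide (r b < r a) && decide (k a < k b))

theorem pv_sorted2_foldl {α κ : Type} [LT κ] [DecidableLT κ] (r : α → Int) (k : α → κ)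
    (xs : List α) :
    PySem.List.sorted2 xs r k false
      = xs.foldl (fun acc x => PySem.List.insertBy (pvLt r k) x acc) [] := rfl

-- inserting x into ranked buckets touches exactly the bucket of rank (r x)
theorem pv_insert_flat {α κ : Type} [LT κ] [DecidableLT κ] (r : α → Int) (k : α → κ) (x : α)
    (R : List Int) (G : Int → List α)
    (hR : R.Pairwise (· < ·)) (ht : r x ∈ R)
    (hG : ∀ j ∈ R, ∀ y ∈ G j, r y = j) :
    PySem.List.insertBy (pvLt r k) x (R.flatMap G)
      = R.flatMap (fun j =>
          if j = r x then PySem.List.insertBy (fun a b => decide (k a < k b)) x (G j) else G j) := by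
  induction R with
  | nil => cases ht
  | cons j R ih =>
    rw [List.pairwise_cons] at hR
    obtain ⟨hlt, hR'⟩ := hR
    simp only [List.flatMap_cons]
    rw [pv_insertBy_append]
    by_cases hj : j = r x
    · -- the head bucket is x's bucket
      have hbefore : ∀ y ∈ G j, pvLt r k x y = decide (k x < k y) := by
        intro y hy
        have hry : r y = j := hG j (by simp) y hy
        simp [pvLt, show ¬ r x < r y by omega, show ¬ r y < r x by omega]
      have hnotR : ∀ j' ∈ R, ¬ j' = r x := by
        intro j' hj'; have := hlt j' hj'; omega
      have hRHS : R.flatMap (fun j' =>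
          if j' = r x then PySem.List.insertBy (fun a b => decide (k a < k b)) x (G j') else G j')
            = R.flatMap G := by
        apply pv_flatMap_congr; intro j' hj'; simp [hnotR j' hj']
      rw [if_pos hj, hRHS]
      have hany : (G j).any (pvLt r k x) = (G j).any (fun y => decide (k x < k y)) :=
        PySem.List.any_congr_mem hbefore
      rw [hany]
      by_cases hin : (G j).any (fun y => decide (k x < k y))
      · rw [if_pos hin]
        rw [pv_insertBy_congr _ (fun a b => decide (k a < k b)) x (G j) hbefore]
      · rw [if_neg hin]
        have hnone : ∀ y ∈ G j, (decide (k x < k y)) = false := by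
          intro y hy
          by_contra hc
          exact hin (List.any_eq_true.mpr ⟨y, hy, by revert hc; cases decide (k x < k y) <;> simp⟩)
        rw [PySem.List.insertBy_of_forall_not_before _ x (G j) hnone]
        have hall : ∀ y ∈ R.flatMap G, pvLt r k x y = true := by
          intro y hy
          obtain ⟨j', hj', hy'⟩ := List.mem_flatMap.mp hy
          have hry : r y = j' := hG j' (by simp [hj']) y hy'
          have : r x < r y := by have := hlt j' hj'; omega
          simp [pvLt, this]
        rw [pv_insertBy_all_before _ x _ hall]
        rw [List.append_assoc]
        rfl
    · -- the head bucket ranks strictly below x: skip it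
      have ht' : r x ∈ R := by cases ht with
        | head => exact absurd rfl hj
        | tail _ h => exact h
      have hjx : j < r x := hlt _ ht'
      have hfalse : (G j).any (pvLt r k x) = false := by
        rw [List.any_eq_false]
        intro y hy
        have hry : r y = j := hG j (by simp) y hy
        simp [pvLt, show ¬ r x < r y by omega, show r y < r x by omega]
      rw [hfalse]
      simp only [Bool.false_eq_true, if_false]
      rw [ih hR' ht' (fun j' hj' => hG j' (List.mem_cons_of_mem _ hj'))]
      rw [if_neg hj]

-- a stable sort by (rank, key) IS: per-rank buckets, each stably sorted by key
theorem pv_bucket_sorted {α κ : Type} [LT κ] [DecidableLT κ] (r : α → Int) (k : α → κ)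
    (R : List Int) (hR : R.Pairwise (· < ·)) (hmem : ∀ x : α, r x ∈ R) (xs : List α) :
    PySem.List.sorted2 xs r k false
      = R.flatMap (fun j => PySem.List.sorted (xs.filter (fun x => r x == j)) k false) := by
  induction xs using List.reverseRecOn with
  | nil =>
    have : ∀ j ∈ R, PySem.List.sorted (List.filter (fun x => r x == j) []) k false = ([] : List α) := by
      intro j _; rfl
    rw [pv_flatMap_congr R _ (fun _ => []) this]
    simp [pv_sorted2_foldl]
  | append_singleton xs x ih =>
    have hL : PySem.List.sorted2 (xs ++ [x]) r k false
        = PySem.List.insertBy (pvLt r k) x (PySem.List.sorted2 xs r k false) := by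
      rw [pv_sorted2_foldl, pv_sorted2_foldl, List.foldl_append]
      rfl
    rw [hL, ih]
    rw [pv_insert_flat r k x R
      (fun j => PySem.List.sorted (xs.filter (fun y => r y == j)) k false) hR (hmem x)
      (by
        intro j _ y hy
        rw [PySem.List.mem_sorted] at hy
        have h2 := (List.mem_filter.mp hy).2
        simpa using h2)]
    apply Eq.symm
    apply pv_flatMap_congr
    intro j _
    rw [List.filter_append]
    by_cases hj : j = r x
    · have hx : (List.filter (fun y => r y == j) [x]) = [x] := by
        simp [hj]
      rw [hx, if_pos hj]
      rw [PySem.List.sorted_eq_foldl_insertBy, PySem.List.sorted_eq_foldl_insertBy,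
        List.foldl_append]
      rfl
    · have hx : (List.filter (fun y => r y == j) [x]) = [] := by
        simp only [List.filter_cons, List.filter_nil]
        have hne : (r x == j) = false := by simpa using Ne.symm hj
        rw [hne]
        rfl
      rw [hx, if_neg hj]
      simp

-- Python's 'o or ""' with a string default "" is just the Option default
theorem pv_orA_empty (o : Option String) : pvOrA o "" = o.getD "" := by
  cases o with
  | none => rfl
  | some s => by_cases h : s = "" <;> simp [pvOrA, h]

-- the rank function A's key computes, phrased on the meta dict
def pvRankOf (m : List (String × String)) : Int :=
  pvRankA.getD ((PySem.Dict.mk m).getD "category" "") (pvOrderA.length : Int)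

theorem pv_key1_eq : pvKey1 = pvRankOf := by
  funext m
  simp only [pvKey1, pvRankOf, pv_orA_empty, PySem.Dict.getD_eq_get?_getD]

theorem pv_key2_eq : pvKey2 = pvKeyB := by
  funext m
  simp only [pvKey2, pvKeyB, pv_orA_empty, PySem.Dict.getD_eq_get?_getD]

theorem pv_rank_mem (m : List (String × String)) :
    pvRankOf m ∈ ([0, 1, 2, 3, 4, 5, 6, 7, 8] : List Int) := by
  have hA : pvRankA = PySem.Dict.mk
      [("FX", 0), ("Metals", 1), ("Equities", 2), ("Crypto", 3), ("Energy", 4),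
       ("Agriculture", 5), ("Softs", 6), ("Livestock", 7)] := by decide
  unfold pvRankOf
  rw [hA]
  generalize (PySem.Dict.mk m).getD "category" "" = s
  simp only [PySem.Dict.getD_eq_get?_getD, PySem.Dict.get?_mk_cons]
  split_ifs <;> simp [PySem.Dict.get?, pvOrderA]

theorem pv_meta_cat (aid sym nm cat : String) :
    (PySem.Dict.mk [("assetId", aid), ("symbol", sym), ("name", nm), ("category", cat)]).getD
        "category" "" = cat := by
  simp [PySem.Dict.getD_eq_get?_getD, PySem.Dict.get?_mk_cons]

theorem pv_rankedOf_eq : pvRankedOf = fun a => (pvRankOf (pvAsMeta a), pvAsMeta a) := by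
  funext a
  simp only [pvRankedOf, pvAsMeta, pvRankOf, pvOrA, pvOrB, pvOrderA, pvOrderB, pvRankA, pvRankB,
    pv_meta_cat]

theorem pv_main (assets : List (List (String × String))) :
    cluster_sorted_meta_py assets = cluster_sorted_meta_py_alt assets := by
  simp only [cluster_sorted_meta_py, cluster_sorted_meta_py_alt]
  rw [show (assets.foldl (fun acc asset => acc ++ [pvRankedOf asset]) [] :
        List (Int × List (String × String))) = [] ++ assets.map pvRankedOf from
      PySem.List.foldl_append_singleton_eq_map pvRankedOf assets []]
  rw [PySem.List.foldl_append_eq_flatMap]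
  simp only [List.nil_append]
  rw [show PySem.List.pyRange 0 ((pvOrderB.length : Int) + 1) 1
        = ([0, 1, 2, 3, 4, 5, 6, 7, 8] : List Int) from by decide]
  rw [pv_key1_eq, pv_key2_eq, pv_rankedOf_eq]
  rw [pv_bucket_sorted pvRankOf pvKeyB [0, 1, 2, 3, 4, 5, 6, 7, 8] (by decide) pv_rank_mem]
  apply pv_flatMap_congr
  intro j _
  rw [List.filter_map, List.filter_map, List.map_map]
  rfl

-- ===== VERDICT (by name: the statement is the Claim_ definition above) =====
theorem cluster_sorted_meta_py_spec : Claim_equal_cluster_sorted_meta_py := by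
  intro assets _
  unfold Spec_cluster_sorted_meta_py
  exact pv_main assets
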